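-- pv_equiv track=rewrite | github.com/GHuss7/UTRP_PhD_Code | DSS_UTNDP_Functions.py | convert_routes_str2list
-- ===== SOURCE A (Python) =====
-- def convert_routes_str2list(routes_R_str):
--     # converts a string standarised version of routes list into a routes list
--     routes_R_list = list()
--     temp_list = list()
--     flag_end_node = True
--     for i in range(len(routes_R_str)):
--         if routes_R_str[i] != "-" and routes_R_str[i] != "*":
--             if flag_end_node:
--                 temp_list.append(int(routes_R_str[i]))
--                 flag_end_node = False
--             else:
--                 temp_list[len(temp_list)-1] = int(str(temp_list[len(temp_list)-1]) + routes_R_str[i])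
--         else:
--             if routes_R_str[i] == "*":          # indicates the end of the route
--                 routes_R_list.append(temp_list)
--                 temp_list = list()
--                 flag_end_node = True
--             else:
--                 if routes_R_str[i] == "-":
--                     flag_end_node = True
--     return routes_R_list
-- ===== SOURCE B (Python) =====
-- def convert_routes_str2list(routes_R_str):
--     # split on '*' and drop the unterminated trailing segment (A only appends on '*');
--     # empty tokens (from collapsed '-' runs or empty routes) are filtered out
--     parts = routes_R_str.split('*')[:-1]
--     return [[int(tok) for tok in part.split('-') if tok] for part in parts]
-- ===== Notes on version B (the rewrite author's own statement) =====
-- stated objective: simpler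
-- what changed: Replaces A's char-by-char scan with a flag and per-character int(str(prev)+c) digit concatenation by string splitting: split('*')[:-1] for the routes (dropping the unterminated tail A never appends), split('-') per route with empty tokens filtered, and one int() per token.
-- outside the precondition, e.g. on convert_routes_str2list('2 3*'): A returns [[23]], B raises ValueError
import Mathlib
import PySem

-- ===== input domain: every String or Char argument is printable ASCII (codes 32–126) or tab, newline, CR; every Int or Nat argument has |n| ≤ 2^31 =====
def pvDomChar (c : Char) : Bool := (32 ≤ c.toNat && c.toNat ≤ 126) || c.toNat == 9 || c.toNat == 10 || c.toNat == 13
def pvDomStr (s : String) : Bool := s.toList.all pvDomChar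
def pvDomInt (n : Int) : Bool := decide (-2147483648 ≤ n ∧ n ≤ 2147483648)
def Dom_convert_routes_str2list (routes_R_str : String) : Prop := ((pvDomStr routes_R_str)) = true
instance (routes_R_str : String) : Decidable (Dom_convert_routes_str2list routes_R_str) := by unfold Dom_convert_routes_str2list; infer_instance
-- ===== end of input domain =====

-- B replaces A's char-by-char flag scan by split('*')[:-1] / split('-') / int() per token: simpler decomposition, same values on Pre_.

-- ===== PORT A =====
-- Python's int(s), ported as the decimal-digit fold a*10 + digit: exact on digit-only
-- strings, which is all that both ports ever feed it on inputs admitted by Pre_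
-- (outside Pre_ the Python A raises ValueError; see Pre_ below).
def pvIntOfDigits (cs : List Char) : Int :=
  cs.foldl (fun a c => a * 10 + ((c.toNat : Int) - 48)) 0

-- one iteration of A's `for i in range(len(routes_R_str))` loop body;
-- state = (routes_R_list, temp_list, flag_end_node)
def convertStep (st : List (List Int) × List Int × Bool) (c : Char) :
    List (List Int) × List Int × Bool :=
  if c ≠ '-' ∧ c ≠ '*' then
    if st.2.2 then
      (st.1, st.2.1 ++ [pvIntOfDigits [c]], false)
    else
      -- temp_list[len(temp_list)-1] = int(str(temp_list[len(temp_list)-1]) + routes_R_str[i])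
      (st.1,
       PySem.List.pySetD st.2.1 ((st.2.1.length : Int) - 1)
         (pvIntOfDigits (PySem.Int.toChars
            (PySem.List.pyGetD st.2.1 ((st.2.1.length : Int) - 1) 0) ++ [c])),
       false)
  else if c = '*' then (st.1 ++ [st.2.1], [], true)
  else if c = '-' then (st.1, st.2.1, true)
  else st

def convert_routes_str2list (routes_R_str : String) : List (List Int) :=
  (routes_R_str.toList.foldl convertStep ([], [], true)).1

-- ===== PORT B =====
def convert_routes_str2list_alt (routes_R_str : String) : List (List Int) :=
  let parts := PySem.Chars.splitOn routes_R_str.toList ['*']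
  (PySem.List.slice parts none (some (-1))).map (fun part =>
    ((PySem.Chars.splitOn part ['-']).filter (fun tok => !tok.isEmpty)).map
      (fun tok => pvIntOfDigits tok))

-- ===== PRECONDITION & SPEC =====
-- Pre_ admits exactly the strings made of digits, '-' and '*'. On any other character A
-- raises ValueError from int() — except when a whitespace character lands in the middle
-- of a digit run, where A's per-character int(str(prev)+c) silently strips it while B's
-- int() on the whole token raises; since B RAISES there, those inputs are excluded too.
def Pre_convert_routes_str2list (routes_R_str : String) : Prop :=
  (routes_R_str.toList.all (fun c => c.isDigit || c == '-' || c == '*')) = true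
instance (routes_R_str : String) : Decidable (Pre_convert_routes_str2list routes_R_str) := by
  unfold Pre_convert_routes_str2list; infer_instance

def pvWitness_convert_routes_str2list : String := "10-2*3*"

def Spec_convert_routes_str2list (routes_R_str : String) (out : List (List Int)) : Prop :=
  out = convert_routes_str2list_alt routes_R_str
instance (routes_R_str : String) (out : List (List Int)) :
    Decidable (Spec_convert_routes_str2list routes_R_str out) := by
  unfold Spec_convert_routes_str2list; infer_instance

-- ===== CLAIM (what is proved, stated in full; the proofs are below) =====
def Claim_equal_convert_routes_str2list : Prop :=
  ∀ (routes_R_str : String), Dom_convert_routes_str2list routes_R_str →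
    Pre_convert_routes_str2list routes_R_str →
    Spec_convert_routes_str2list routes_R_str (convert_routes_str2list routes_R_str)

-- ===== LEMMAS AND PROOFS =====

-- Python's split on a one-character separator, in directly-recursive form.
def split1 (sep : Char) : List Char → List (List Char)
  | [] => [[]]
  | c :: cs => if c = sep then [] :: split1 sep cs else (split1 sep cs).modifyHead (c :: ·)

theorem split1_ne_nil (sep : Char) (cs : List Char) : split1 sep cs ≠ [] := by
  induction cs with
  | nil => simp [split1]
  | cons c cs ih =>
    simp only [split1]
    split_ifs
    · simp
    · intro h
      apply ih
      simpa using congrArg List.length h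

theorem splitOn_go_spec (sep : Char) :
    ∀ (fuel : Nat) (l cur : List Char) (acc : List (List Char)), l.length ≤ fuel →
      PySem.Chars.splitOn.go [sep] fuel l cur acc
        = acc.reverse ++ (split1 sep l).modifyHead (cur.reverse ++ ·) := by
  intro fuel
  induction fuel with
  | zero =>
    intro l cur acc h
    have : l = [] := by cases l <;> simp_all
    subst this
    simp [PySem.Chars.splitOn.go, split1]
  | succ fuel ih =>
    intro l cur acc h
    cases l with
    | nil => simp [PySem.Chars.splitOn.go, split1]
    | cons c rest =>
      rw [PySem.Chars.splitOn.go]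
      by_cases hc : c = sep
      · subst hc
        have hp : List.isPrefixOf [c] (c :: rest) = true := by simp [List.isPrefixOf]
        rw [if_pos hp]
        simp only [List.length_cons] at h
        rw [ih _ _ _ (by simpa using Nat.le_of_succ_le_succ h)]
        simp only [split1, if_pos rfl]
        rcases hq : split1 c rest with _ | ⟨p, ps⟩
        · exact absurd hq (split1_ne_nil c rest)
        · split <;> simp_all
      · have hp : List.isPrefixOf [sep] (c :: rest) = false := by
          simp [List.isPrefixOf]
          exact fun hsc => absurd hsc.symm hc
        rw [if_neg (by simp [hp])]
        simp only [List.length_cons] at h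
        rw [ih _ _ _ (by omega)]
        simp only [split1, if_neg hc]
        rcases hq : split1 sep rest with _ | ⟨p, ps⟩
        · exact absurd hq (split1_ne_nil sep rest)
        · simp [hq, List.modifyHead_cons]

theorem splitOn_eq_split1 (sep : Char) (cs : List Char) :
    PySem.Chars.splitOn cs [sep] = split1 sep cs := by
  unfold PySem.Chars.splitOn
  rw [splitOn_go_spec sep (cs.length + 1) cs [] [] (by omega)]
  rcases hq : split1 sep cs with _ | ⟨p, ps⟩
  · exact absurd hq (split1_ne_nil sep cs)
  · simp

theorem intOfDigits_from (t : List Char) :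
    ∀ a : Int, t.foldl (fun a c => a * 10 + ((c.toNat : Int) - 48)) a
      = a * 10 ^ t.length + pvIntOfDigits t := by
  induction t with
  | nil => intro a; simp [pvIntOfDigits]
  | cons c t ih =>
    intro a
    have h1 := ih (a * 10 + ((c.toNat : Int) - 48))
    have h2 := ih ((0 : Int) * 10 + ((c.toNat : Int) - 48))
    simp only [pvIntOfDigits, List.foldl_cons, List.length_cons] at *
    rw [h1, h2]
    ring

theorem intOfDigits_cons (c : Char) (t : List Char) :
    pvIntOfDigits (c :: t) = ((c.toNat : Int) - 48) * 10 ^ t.length + pvIntOfDigits t := by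
  simp only [pvIntOfDigits, List.foldl_cons]
  rw [intOfDigits_from]
  simp only [pvIntOfDigits]
  ring

theorem intOfDigits_append_digit (xs : List Char) (c : Char) :
    pvIntOfDigits (xs ++ [c]) = pvIntOfDigits xs * 10 + ((c.toNat : Int) - 48) := by
  simp [pvIntOfDigits, List.foldl_append]

-- str(n) for a nonnegative n, recursively.
def digitsOf10 (n : Nat) : List Char :=
  if n / 10 = 0 then [Nat.digitChar (n % 10)]
  else digitsOf10 (n / 10) ++ [Nat.digitChar (n % 10)]
termination_by n
decreasing_by exact Nat.div_lt_self (by omega) (by norm_num)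

theorem toDigitsCore_spec :
    ∀ (fuel n : Nat) (ds : List Char), n < fuel →
      Nat.toDigitsCore 10 fuel n ds = digitsOf10 n ++ ds := by
  intro fuel
  induction fuel with
  | zero => intro n ds h; omega
  | succ fuel ih =>
    intro n ds h
    rw [Nat.toDigitsCore]
    by_cases h10 : n / 10 = 0
    · rw [if_pos h10, digitsOf10, if_pos h10]; simp
    · rw [if_neg h10,
        ih (n / 10) _ (by have := Nat.div_lt_self (by omega : 0 < n) (by norm_num : 1 < 10); omega)]
      conv_rhs => rw [digitsOf10, if_neg h10]
      simp

theorem dv_digitChar (r : Nat) (h : r < 10) :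
    ((Nat.digitChar r).toNat : Int) - 48 = r := by
  interval_cases r <;> decide

theorem intOfDigits_digitsOf10 (n : Nat) : pvIntOfDigits (digitsOf10 n) = n := by
  induction n using digitsOf10.induct with
  | case1 n h10 =>
    rw [digitsOf10, if_pos h10]
    have : n % 10 = n := by omega
    simp [pvIntOfDigits, dv_digitChar (n % 10) (by omega)]
    omega
  | case2 n h10 ih =>
    rw [digitsOf10, if_neg h10]
    rw [intOfDigits_append_digit, ih, dv_digitChar (n % 10) (by omega)]
    push_cast
    omega

theorem intOfDigits_toChars (n : Int) (h : 0 ≤ n) :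
    pvIntOfDigits (PySem.Int.toChars n) = n := by
  unfold PySem.Int.toChars
  rw [if_neg (by omega)]
  unfold Nat.toDigits
  rw [toDigitsCore_spec _ _ _ (by omega)]
  simp [intOfDigits_digitsOf10]
  omega

-- the digits appended while A is inside one node, absorbed into temp_list
def mergeTok (temp : List Int) (flag : Bool) (t : List Char) : List Int :=
  if t = [] then temp
  else if flag then temp ++ [pvIntOfDigits t]
  else temp.dropLast ++ [(temp.getLast?.getD 0) * 10 ^ t.length + pvIntOfDigits t]

-- one '*'-part processed from state (temp_list, flag)
def mergeRoute (temp : List Int) (flag : Bool) (p : List Char) : List Int :=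
  match split1 '-' p with
  | [] => temp
  | t :: ts => mergeTok temp flag t ++ (ts.filter (fun x => !x.isEmpty)).map pvIntOfDigits

-- what A's loop will return from state (temp_list, flag) on the remaining input
def combine (temp : List Int) (flag : Bool) (cs : List Char) : List (List Int) :=
  match split1 '*' cs with
  | [] => []
  | p :: ps =>
    if ps = [] then []
    else mergeRoute temp flag p :: ps.dropLast.map (fun q => mergeRoute [] true q)

theorem mergeRoute_nil_true (q : List Char) :
    mergeRoute [] true q
      = ((split1 '-' q).filter (fun x => !x.isEmpty)).map pvIntOfDigits := by
  unfold mergeRoute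
  rcases hq : split1 '-' q with _ | ⟨t, ts⟩
  · exact absurd hq (split1_ne_nil _ _)
  · by_cases ht : t = []
    · subst ht; simp [mergeTok]
    · simp [mergeTok, ht, List.isEmpty_iff]

theorem mergeRoute_dash (temp : List Int) (flag : Bool) (p : List Char) :
    mergeRoute temp flag ('-' :: p) = mergeRoute temp true p := by
  unfold mergeRoute
  simp only [split1, if_pos rfl]
  rcases hq : split1 '-' p with _ | ⟨t, ts⟩
  · exact absurd hq (split1_ne_nil _ _)
  · by_cases ht : t = []
    · subst ht; simp [mergeTok]
    · simp [mergeTok, ht, List.isEmpty_iff]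

theorem mergeRoute_digit_true (temp : List Int) (c : Char) (p : List Char) (hc : c ≠ '-') :
    mergeRoute temp true (c :: p) = mergeRoute (temp ++ [(c.toNat : Int) - 48]) false p := by
  unfold mergeRoute
  simp only [split1, if_neg hc]
  rcases hq : split1 '-' p with _ | ⟨t, ts⟩
  · exact absurd hq (split1_ne_nil _ _)
  · simp only [hq, List.modifyHead_cons]
    by_cases ht : t = []
    · subst ht
      simp [mergeTok, pvIntOfDigits]
    · simp [mergeTok, ht, intOfDigits_cons, List.dropLast_concat, List.getLast?_concat]

theorem mergeRoute_digit_false (temp : List Int) (c : Char) (p : List Char) (hc : c ≠ '-')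
    (hne : temp ≠ []) :
    mergeRoute temp false (c :: p)
      = mergeRoute (temp.dropLast ++ [(temp.getLast?.getD 0) * 10 + ((c.toNat : Int) - 48)])
          false p := by
  unfold mergeRoute
  simp only [split1, if_neg hc]
  rcases hq : split1 '-' p with _ | ⟨t, ts⟩
  · exact absurd hq (split1_ne_nil _ _)
  · simp only [hq, List.modifyHead_cons]
    by_cases ht : t = []
    · subst ht
      simp [mergeTok, pvIntOfDigits]
    · simp [mergeTok, ht, intOfDigits_cons, List.dropLast_concat, List.getLast?_concat]
      ring

theorem combine_star (temp : List Int) (flag : Bool) (cs : List Char) :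
    combine temp flag ('*' :: cs) = temp :: combine [] true cs := by
  unfold combine
  simp only [split1, if_pos rfl]
  rcases hq : split1 '*' cs with _ | ⟨p, ps⟩
  · exact absurd hq (split1_ne_nil _ _)
  · have hmr : mergeRoute temp flag [] = temp := by simp [mergeRoute, split1, mergeTok]
    by_cases hps : ps = []
    · subst hps; simp [hmr, split1_ne_nil]
    · simp [hps, hmr, split1_ne_nil, List.dropLast_cons_of_ne_nil, mergeRoute_nil_true]

theorem combine_dash (temp : List Int) (flag : Bool) (cs : List Char) :
    combine temp flag ('-' :: cs) = combine temp true cs := by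
  unfold combine
  simp only [split1, if_neg (by decide : ¬('-' = '*'))]
  rcases hq : split1 '*' cs with _ | ⟨p, ps⟩
  · exact absurd hq (split1_ne_nil _ _)
  · by_cases hps : ps = []
    · subst hps; simp
    · simp [hps, mergeRoute_dash]

theorem combine_digit_true (temp : List Int) (c : Char) (cs : List Char)
    (hc1 : c ≠ '-') (hc2 : c ≠ '*') :
    combine temp true (c :: cs)
      = combine (temp ++ [(c.toNat : Int) - 48]) false cs := by
  unfold combine
  simp only [split1, if_neg hc2]
  rcases hq : split1 '*' cs with _ | ⟨p, ps⟩
  · exact absurd hq (split1_ne_nil _ _)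
  · by_cases hps : ps = []
    · subst hps; simp
    · simp [hps, mergeRoute_digit_true _ _ _ hc1]

theorem combine_digit_false (temp : List Int) (c : Char) (cs : List Char)
    (hc1 : c ≠ '-') (hc2 : c ≠ '*') (hne : temp ≠ []) :
    combine temp false (c :: cs)
      = combine (temp.dropLast ++ [(temp.getLast?.getD 0) * 10 + ((c.toNat : Int) - 48)])
          false cs := by
  unfold combine
  simp only [split1, if_neg hc2]
  rcases hq : split1 '*' cs with _ | ⟨p, ps⟩
  · exact absurd hq (split1_ne_nil _ _)
  · by_cases hps : ps = []
    · subst hps; simp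
    · simp [hps, mergeRoute_digit_false _ _ _ hc1 hne]

theorem set_concat (ys : List Int) (x v : Int) :
    (ys ++ [x]).set ys.length v = ys ++ [v] := by
  induction ys with
  | nil => simp
  | cons a ys ih => simpa using ih

theorem pyGetD_last (temp : List Int) (hne : temp ≠ []) :
    PySem.List.pyGetD temp ((temp.length : Int) - 1) 0 = temp.getLast?.getD 0 := by
  rcases (temp.eq_nil_or_concat) with h | ⟨ys, x, h⟩
  · exact absurd h hne
  · subst h
    simp only [List.concat_eq_append]
    have h1 : ((ys ++ [x]).length : Int) - 1 = ((ys.length : Nat) : Int) := by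
      simp [List.length_append]
    rw [h1, PySem.List.pyGetD_natCast]
    simp [List.getD]

theorem pySetD_last (temp : List Int) (hne : temp ≠ []) (v : Int) :
    PySem.List.pySetD temp ((temp.length : Int) - 1) v = temp.dropLast ++ [v] := by
  rcases (temp.eq_nil_or_concat) with h | ⟨ys, x, h⟩
  · exact absurd h hne
  · subst h
    simp only [List.concat_eq_append]
    unfold PySem.List.pySetD PySem.List.pySet?
    have h1 : PySem.List.pyIdx? (ys ++ [x]).length (((ys ++ [x]).length : Int) - 1)
        = some ys.length := by
      simp only [PySem.List.pyIdx?, List.length_append, List.length_cons, List.length_nil]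
      norm_num
    rw [h1]
    simpa using set_concat ys x v

theorem foldA_eq (cs : List Char)
    (hpre : ∀ c ∈ cs, c.isDigit = true ∨ c = '-' ∨ c = '*') :
    ∀ (acc : List (List Int)) (temp : List Int) (flag : Bool),
      (flag = false → temp ≠ [] ∧ 0 ≤ temp.getLast?.getD 0) →
      (cs.foldl convertStep (acc, temp, flag)).1 = acc ++ combine temp flag cs := by
  revert hpre
  induction cs with
  | nil =>
    intro _ acc temp flag _
    simp [combine, split1]
  | cons c cs ih =>
    intro hpre acc temp flag hinv
    have hctail : ∀ x ∈ cs, x.isDigit = true ∨ x = '-' ∨ x = '*' := fun x hx =>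
      hpre x (List.mem_cons_of_mem _ hx)
    have hc := hpre c (by simp)
    rw [List.foldl_cons]
    by_cases hstar : c = '*'
    · subst hstar
      have hstep : convertStep (acc, temp, flag) '*' = (acc ++ [temp], [], true) := by
        simp [convertStep]
      rw [hstep, ih hctail _ _ _ (by simp), combine_star]
      simp
    · by_cases hdash : c = '-'
      · subst hdash
        have hstep : convertStep (acc, temp, flag) '-' = (acc, temp, true) := by
          simp [convertStep]
        rw [hstep, ih hctail _ _ _ (by simp), combine_dash]
      · have hdig : c.isDigit = true := by rcases hc with h | h | h <;> simp_all
        have h48 : (48 : Int) ≤ c.toNat := by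
          simp only [Char.isDigit, Bool.and_eq_true, decide_eq_true_eq] at hdig
          exact_mod_cast (by exact_mod_cast hdig.1 : (48 : Nat) ≤ c.toNat)
        cases flag with
        | true =>
          have hstep : convertStep (acc, temp, true) c
              = (acc, temp ++ [(c.toNat : Int) - 48], false) := by
            simp [convertStep, hdash, hstar, pvIntOfDigits]
          rw [hstep, ih hctail _ _ _ ?_, combine_digit_true temp c cs hdash hstar]
          intro _
          refine ⟨by simp, ?_⟩
          simp only [List.getLast?_concat, Option.getD_some]
          omega
        | false =>
          obtain ⟨hne, hnn⟩ := hinv rfl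
          have hstep : convertStep (acc, temp, false) c
              = (acc, temp.dropLast ++ [(temp.getLast?.getD 0) * 10 + ((c.toNat : Int) - 48)],
                 false) := by
            unfold convertStep
            rw [if_pos ⟨hdash, hstar⟩, if_neg (by simp)]
            rw [pyGetD_last temp hne, intOfDigits_append_digit,
              intOfDigits_toChars _ hnn, pySetD_last temp hne]
          rw [hstep, ih hctail _ _ _ ?_,
            combine_digit_false temp c cs hdash hstar hne]
          intro _
          refine ⟨by simp, ?_⟩
          simp only [List.getLast?_concat, Option.getD_some]
          have h0 : (0 : Int) ≤ temp.getLast?.getD 0 * 10 := by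
            have := hnn; omega
          omega

theorem alt_eq_combine (s : String) :
    convert_routes_str2list_alt s = combine [] true s.toList := by
  unfold convert_routes_str2list_alt
  simp only [splitOn_eq_split1, PySem.List.slice_to_neg_one]
  have hmap : ((split1 '*' s.toList).dropLast.map (fun part =>
        ((split1 '-' part).filter (fun tok => !tok.isEmpty)).map
          (fun tok => pvIntOfDigits tok)))
      = (split1 '*' s.toList).dropLast.map (fun q => mergeRoute [] true q) := by
    apply List.map_congr_left
    intro q _
    rw [mergeRoute_nil_true]
  rw [hmap]
  unfold combine
  rcases hq : split1 '*' s.toList with _ | ⟨p, ps⟩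
  · exact absurd hq (split1_ne_nil _ _)
  · simp only [hq]
    by_cases hps : ps = []
    · subst hps; simp
    · simp [hps, List.dropLast_cons_of_ne_nil]

-- ===== VERDICT (by name: the statement is the Claim_ definition above) =====
theorem convert_routes_str2list_spec : Claim_equal_convert_routes_str2list := by
  intro s _ hpre
  unfold Spec_convert_routes_str2list
  unfold Pre_convert_routes_str2list at hpre
  rw [List.all_eq_true] at hpre
  have hpre' : ∀ c ∈ s.toList, c.isDigit = true ∨ c = '-' ∨ c = '*' := by
    intro c hc
    have := hpre c hc
    simp only [Bool.or_eq_true, beq_iff_eq] at this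
    tauto
  unfold convert_routes_str2list
  rw [foldA_eq s.toList hpre' [] [] true (by simp), alt_eq_combine]
  simp
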